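-- pv_equiv track=rewrite | github.com/Themaoqiu/DORO-STVG | graph_generator/modules/query_generator_minimal.py | _frames_to_segments
-- ===== SOURCE A (Python) =====
-- from typing import Any, Dict, Iterable, List, Optional, Set, Tuple, Union
--
-- def _frames_to_segments(frames: Set[int]) -> List[Tuple[int, int]]:
--     if not frames:
--         return []
--     arr = sorted(frames)
--     out: List[Tuple[int, int]] = []
--     a = b = arr[0]
--     for x in arr[1:]:
--         if x == b + 1:
--             b = x
--         else:
--             out.append((a, b))
--             a = b = x
--     out.append((a, b))
--     return out
-- ===== SOURCE B (Python) =====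
-- def _frames_to_segments(frames):
--     s = set(frames)
--     starts = sorted(x for x in s if x - 1 not in s)
--     ends = sorted(x for x in s if x + 1 not in s)
--     return list(zip(starts, ends))
-- ===== Notes on version B (the rewrite author's own statement) =====
-- stated objective: alternative
-- what changed: A's single pass over the sorted list with a running (a,b) segment accumulator is replaced by set-boundary detection: segment starts are elements x with x-1 not in the set, segment ends are elements x with x+1 not in the set; sorting the starts and the ends and zipping them yields the maximal intervals, with no adjacent-element comparison at all.
import Mathlib
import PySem

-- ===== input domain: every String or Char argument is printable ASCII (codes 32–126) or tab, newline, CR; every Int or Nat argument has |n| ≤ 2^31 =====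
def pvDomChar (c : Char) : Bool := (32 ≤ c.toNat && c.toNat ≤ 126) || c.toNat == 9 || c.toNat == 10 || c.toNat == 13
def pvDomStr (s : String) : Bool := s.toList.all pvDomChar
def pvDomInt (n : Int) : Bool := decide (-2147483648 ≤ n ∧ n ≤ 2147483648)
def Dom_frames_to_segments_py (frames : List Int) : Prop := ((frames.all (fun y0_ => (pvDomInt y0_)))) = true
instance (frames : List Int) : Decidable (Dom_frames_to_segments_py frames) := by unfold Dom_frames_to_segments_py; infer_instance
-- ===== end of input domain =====

-- B replaces A's sorted linear scan (running (a,b) state machine over adjacent sorted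
-- elements) by set-boundary detection: a segment start is x with x-1 not in the set, a
-- segment end is x with x+1 not in the set; sorting the starts and the ends and zipping
-- them pairs up the maximal intervals in order (objective: alternative, same cost).

-- ===== PORT A =====
-- literal port of Source A: empty guard; arr = sorted(frames); running (out, a, b) over arr[1:]
def frames_to_segments_py (frames : List Int) : List (Int × Int) :=
  if frames = [] then []
  else
    let arr := PySem.List.sorted frames (fun x => x) false
    let a0 := PySem.List.pyGetD arr 0 0          -- arr[0]; in range: frames ≠ []
    let st := (PySem.List.slice arr (some 1) none).foldl
      (fun (st : List (Int × Int) × Int × Int) x =>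
        if x = st.2.2 + 1 then (st.1, st.2.1, x)
        else (st.1 ++ [(st.2.1, st.2.2)], x, x))
      ([], a0, a0)
    st.1 ++ [(st.2.1, st.2.2)]

-- ===== PORT B =====
-- literal port of Source B: s = set(frames); starts/ends by membership tests; zip.
-- (Python iterates the set in hash order before sorting; the sorted results are
-- iteration-order independent, so ofList's first-occurrence order is exact here.)
def frames_to_segments_py_alt (frames : List Int) : List (Int × Int) :=
  let s : PySem.Set Int := PySem.Set.ofList frames
  let starts := PySem.List.sorted (s.filter (fun x => !PySem.Set.contains s (x - 1))) (fun x => x) false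
  let ends := PySem.List.sorted (s.filter (fun x => !PySem.Set.contains s (x + 1))) (fun x => x) false
  starts.zip ends

-- ===== PRECONDITION & SPEC =====
-- Pre_ excludes lists with duplicate elements: the Python parameter is Set[int], so the
-- List Int here represents a set and must hold distinct elements (duplicated lists do
-- not correspond to any Python input of this function).
def Pre_frames_to_segments_py (frames : List Int) : Prop := frames.Nodup
instance (frames : List Int) : Decidable (Pre_frames_to_segments_py frames) := by unfold Pre_frames_to_segments_py; infer_instance

def pvWitness_frames_to_segments_py : List Int := [0, 1, 3]

def Spec_frames_to_segments_py (frames : List Int) (out : List (Int × Int)) : Prop := out = frames_to_segments_py_alt frames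
instance (frames : List Int) (out : List (Int × Int)) : Decidable (Spec_frames_to_segments_py frames out) := by unfold Spec_frames_to_segments_py; infer_instance

-- ===== CLAIM (what is proved, stated in full; the proofs are below) =====
def Claim_equal_frames_to_segments_py : Prop := ∀ (frames : List Int), Dom_frames_to_segments_py frames → Pre_frames_to_segments_py frames → Spec_frames_to_segments_py frames (frames_to_segments_py frames)

-- ===== LEMMAS AND PROOFS =====

-- common specification: split a list into maximal runs of consecutive integers
def pvRunEnd : Int → List Int → Int × List Int
  | b, [] => (b, [])
  | b, x :: xs => if x = b + 1 then pvRunEnd x xs else (b, x :: xs)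

theorem pvRunEnd_len (b : Int) (t : List Int) : (pvRunEnd b t).2.length ≤ t.length := by
  fun_induction pvRunEnd with
  | case1 => simp
  | case2 b xs ih => simpa [pvRunEnd] using Nat.le_succ_of_le ih
  | case3 b x xs h => simp

def pvSegs : List Int → List (Int × Int)
  | [] => []
  | h :: t => (h, (pvRunEnd h t).1) :: pvSegs (pvRunEnd h t).2
termination_by l => l.length
decreasing_by have := pvRunEnd_len h t; simpa using Nat.lt_succ_of_le this

-- A's loop computes pvSegs
theorem pvA_loop (t : List Int) (out : List (Int × Int)) (a b : Int) :
    (let st := t.foldl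
      (fun (st : List (Int × Int) × Int × Int) x =>
        if x = st.2.2 + 1 then (st.1, st.2.1, x)
        else (st.1 ++ [(st.2.1, st.2.2)], x, x))
      (out, a, b)
     st.1 ++ [(st.2.1, st.2.2)])
    = out ++ (a, (pvRunEnd b t).1) :: pvSegs (pvRunEnd b t).2 := by
  induction t generalizing out a b with
  | nil => simp [pvRunEnd, pvSegs]
  | cons x xs ih =>
    by_cases h : x = b + 1
    · simpa [List.foldl_cons, h, pvRunEnd] using ih out a x
    · have := ih (out ++ [(a, b)]) x x
      simp only [List.foldl_cons, if_neg h] at *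
      simp [pvRunEnd, h, pvSegs, this]

theorem pvA_eq_segs (frames : List Int) :
    frames_to_segments_py frames = pvSegs (PySem.List.sorted frames (fun x => x) false) := by
  unfold frames_to_segments_py
  by_cases hf : frames = []
  · simp [hf, PySem.List.sorted, pvSegs]
  · have hne : PySem.List.sorted frames (fun x => x) false ≠ [] := by
      intro h
      have := PySem.List.sorted_perm frames (fun x => x) false
      rw [h] at this
      exact hf (this.symm.eq_nil)
    obtain ⟨h0, t, harr⟩ : ∃ h0 t, PySem.List.sorted frames (fun x => x) false = h0 :: t :=
      ⟨_, _, (List.exists_cons_of_ne_nil hne).choose_spec.choose_spec⟩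
    simp only [if_neg hf, harr]
    have hget : PySem.List.pyGetD (h0 :: t) (0 : Int) 0 = h0 := by
      simp [PySem.List.pyGetD_zero_cons]
    have hslice : PySem.List.slice (h0 :: t) (some 1) none = t := by
      simpa using PySem.List.slice_from_one (h0 :: t)
    rw [hget, hslice]
    have := pvA_loop t [] h0 h0
    simpa [pvSegs] using this

-- B side: on a strictly increasing list, pvSegs is the zip of the boundary filters
theorem pvSegs_eq_zip (t : List Int) (hp : List.Pairwise (· < ·) t) :
    pvSegs t = List.zip (t.filter (fun y => !t.contains (y - 1)))
                        (t.filter (fun y => !t.contains (y + 1))) := by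
  induction t with
  | nil => simp [pvSegs]
  | cons h rest ih =>
    cases rest with
    | nil =>
      have e1 : ¬ ((h : Int) - 1 = h) := by omega
      have e2 : ¬ ((h : Int) + 1 = h) := by omega
      simp [pvSegs, pvRunEnd, List.filter, List.contains_eq_mem, e1, e2, List.zip]
    | cons x r =>
      have hhu : ∀ y ∈ x :: r, h < y := (List.pairwise_cons.mp hp).1
      have hpu : List.Pairwise (· < ·) (x :: r) := (List.pairwise_cons.mp hp).2
      have hhx : h < x := hhu x (List.mem_cons_self)
      have hxr : ∀ y ∈ r, x < y := (List.pairwise_cons.mp hpu).1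
      have hm1 : (h : Int) - 1 ∉ h :: x :: r := by
        intro hm
        rcases List.mem_cons.mp hm with e | hm'
        · omega
        · have := hhu _ hm'; omega
      have hIH := ih hpu
      by_cases hx : x = h + 1
      -- x continues h's run
      · have hr1 : pvRunEnd h (x :: r) = pvRunEnd x r := by simp [pvRunEnd, hx]
        -- starts of the big list: h kept, x dropped (x-1 = h present), rest congruent
        have hxin : x - 1 ∈ h :: x :: r := by
          simp [hx]
        have hcongS : ∀ y ∈ r,
            (!(h :: x :: r).contains (y - 1)) = (!(x :: r).contains (y - 1)) := by
          intro y hy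
          have hyx := hxr y hy
          have : ((y - 1) ∈ h :: x :: r) ↔ ((y - 1) ∈ x :: r) := by
            constructor
            · intro hmem
              rcases List.mem_cons.mp hmem with e | hm'
              · omega
              · exact hm'
            · exact fun hm' => List.mem_cons_of_mem _ hm'
          simp [List.contains_eq_mem, this]
        have hstartsT :
            (h :: x :: r).filter (fun y => !(h :: x :: r).contains (y - 1))
              = h :: r.filter (fun y => !(x :: r).contains (y - 1)) := by
          rw [List.filter_cons, List.filter_cons, List.filter_congr hcongS]
          simp [List.contains_eq_mem, hm1, hxin]
        have hxm1 : (x : Int) - 1 ∉ x :: r := by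
          intro hm
          rcases List.mem_cons.mp hm with e | hm'
          · omega
          · have := hxr _ hm'; omega
        have hstartsU :
            (x :: r).filter (fun y => !(x :: r).contains (y - 1))
              = x :: r.filter (fun y => !(x :: r).contains (y - 1)) := by
          rw [List.filter_cons]
          simp [List.contains_eq_mem, hxm1]
        -- ends: h dropped (h+1 = x present), rest congruent to the sublist's own test
        have hhp1 : (h : Int) + 1 ∈ h :: x :: r := by simp [hx]
        have hcongE : ∀ y ∈ x :: r,
            (!(h :: x :: r).contains (y + 1)) = (!(x :: r).contains (y + 1)) := by
          intro y hy
          have hyh := hhu y hy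
          have : ((y + 1) ∈ h :: x :: r) ↔ ((y + 1) ∈ x :: r) := by
            constructor
            · intro hmem
              rcases List.mem_cons.mp hmem with e | hm'
              · omega
              · exact hm'
            · exact fun hm' => List.mem_cons_of_mem _ hm'
          simp [List.contains_eq_mem, this]
        have hendsT :
            (h :: x :: r).filter (fun y => !(h :: x :: r).contains (y + 1))
              = (x :: r).filter (fun y => !(x :: r).contains (y + 1)) := by
          rw [List.filter_cons, List.filter_congr hcongE]
          simp [List.contains_eq_mem, hhp1]
        rw [hstartsU] at hIH
        rw [hstartsT, hendsT]
        cases hE : (x :: r).filter (fun y => !(x :: r).contains (y + 1)) with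
        | nil =>
          rw [hE] at hIH
          rw [pvSegs] at hIH
          simp at hIH
        | cons e E' =>
          rw [hE] at hIH
          rw [pvSegs] at hIH
          simp only [List.zip_cons_cons] at hIH
          obtain ⟨hpair, htl⟩ := List.cons_eq_cons.mp hIH
          have he2 : (pvRunEnd x r).1 = e := congrArg Prod.snd hpair
          rw [pvSegs]
          simp only [hr1, List.zip_cons_cons]
          exact congrArg₂ List.cons (by rw [he2]) htl
      -- x starts a new run
      · have hgt : h + 1 < x := by omega
        have hr1 : pvRunEnd h (x :: r) = (h, x :: r) := by simp [pvRunEnd, hx]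
        have hcongS : ∀ y ∈ x :: r,
            (!(h :: x :: r).contains (y - 1)) = (!(x :: r).contains (y - 1)) := by
          intro y hy
          have : ((y - 1) ∈ h :: x :: r) ↔ ((y - 1) ∈ x :: r) := by
            constructor
            · intro hmem
              rcases List.mem_cons.mp hmem with e | hm'
              · exfalso
                rcases List.mem_cons.mp hy with e' | hy'
                · omega
                · have := hxr _ hy'; omega
              · exact hm'
            · exact fun hm' => List.mem_cons_of_mem _ hm'
          simp [List.contains_eq_mem, this]
        have hcongE : ∀ y ∈ x :: r,
            (!(h :: x :: r).contains (y + 1)) = (!(x :: r).contains (y + 1)) := by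
          intro y hy
          have hyh := hhu y hy
          have : ((y + 1) ∈ h :: x :: r) ↔ ((y + 1) ∈ x :: r) := by
            constructor
            · intro hmem
              rcases List.mem_cons.mp hmem with e | hm'
              · omega
              · exact hm'
            · exact fun hm' => List.mem_cons_of_mem _ hm'
          simp [List.contains_eq_mem, this]
        have hm2 : (h : Int) + 1 ∉ h :: x :: r := by
          intro hm
          rcases List.mem_cons.mp hm with e | hm'
          · omega
          · rcases List.mem_cons.mp hm' with e' | hm''
            · omega
            · have := hxr _ hm''; omega
        have hstartsT :
            (h :: x :: r).filter (fun y => !(h :: x :: r).contains (y - 1))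
              = h :: (x :: r).filter (fun y => !(x :: r).contains (y - 1)) := by
          rw [List.filter_cons, List.filter_congr hcongS]
          simp [List.contains_eq_mem, hm1]
        have hendsT :
            (h :: x :: r).filter (fun y => !(h :: x :: r).contains (y + 1))
              = h :: (x :: r).filter (fun y => !(x :: r).contains (y + 1)) := by
          rw [List.filter_cons, List.filter_congr hcongE]
          simp [List.contains_eq_mem, hm2]
        rw [hstartsT, hendsT, pvSegs]
        simp only [hr1, List.zip_cons_cons]
        exact congrArg₂ List.cons rfl (ih hpu)

-- the sorted input list is strictly increasing under Nodup
theorem pv_sorted_strict (frames : List Int) (hnd : frames.Nodup) :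
    List.Pairwise (· < ·) (PySem.List.sorted frames (fun x => x) false) := by
  have hperm := PySem.List.sorted_perm frames (fun x => x) false
  have hle : List.Pairwise (fun a b : Int => a ≤ b)
      (PySem.List.sorted frames (fun x => x) false) :=
    PySem.List.sorted_pairwise frames (fun x => x)
  have hnd' : (PySem.List.sorted frames (fun x => x) false).Nodup :=
    (hperm.nodup_iff).mpr hnd
  exact (hle.and hnd').imp (fun hab => lt_of_le_of_ne hab.1 hab.2)

-- B's sorted filtered set equals the filter of the sorted list
theorem pv_alt_filter (frames : List Int) (hnd : frames.Nodup) (δ : Int) :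
    PySem.List.sorted
      ((PySem.Set.ofList frames).filter
        (fun x => !PySem.Set.contains (PySem.Set.ofList frames) (x + δ))) (fun x => x) false
    = (PySem.List.sorted frames (fun x => x) false).filter
        (fun y => !(PySem.List.sorted frames (fun x => x) false).contains (y + δ)) := by
  have hperm_tf := PySem.List.sorted_perm frames (fun x => x) false
  have hperm_sf : (PySem.Set.ofList frames).Perm frames := by
    rw [List.perm_ext_iff_of_nodup (PySem.Set.nodup_ofList frames) hnd]
    exact fun a => PySem.Set.mem_ofList frames a
  have hperm_st : (PySem.Set.ofList frames).Perm
      (PySem.List.sorted frames (fun x => x) false) := hperm_sf.trans hperm_tf.symm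
  have hpredeq : ∀ y : Int,
      PySem.Set.contains (PySem.Set.ofList frames) (y + δ)
        = (PySem.List.sorted frames (fun x => x) false).contains (y + δ) := by
    intro y
    simp only [PySem.Set.contains, List.contains_eq_mem]
    exact decide_eq_decide.mpr (hperm_st.mem_iff)
  have hfe : (PySem.Set.ofList frames).filter
        (fun x => !PySem.Set.contains (PySem.Set.ofList frames) (x + δ))
      = (PySem.Set.ofList frames).filter
        (fun y => !(PySem.List.sorted frames (fun x => x) false).contains (y + δ)) :=
    List.filter_congr (fun y _ => by rw [hpredeq y])
  rw [hfe]
  exact PySem.List.sorted_eq_of_perm_of_pairwise_lt _ _ _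
    ((hperm_st.filter _).symm)
    ((pv_sorted_strict frames hnd).filter _)

-- ===== VERDICT (by name: the statement is the Claim_ definition above) =====
theorem frames_to_segments_py_spec : Claim_equal_frames_to_segments_py := by
  intro frames _ hnd
  unfold Spec_frames_to_segments_py frames_to_segments_py_alt
  rw [pvA_eq_segs, pvSegs_eq_zip _ (pv_sorted_strict frames hnd)]
  have h1 := pv_alt_filter frames hnd (-1)
  have h2 := pv_alt_filter frames hnd 1
  simp only [show ∀ y : Int, y + (-1) = y - 1 from fun y => by omega] at h1
  show _ = (PySem.List.sorted ((PySem.Set.ofList frames).filter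
      (fun x => !PySem.Set.contains (PySem.Set.ofList frames) (x - 1))) (fun x => x) false).zip
    (PySem.List.sorted ((PySem.Set.ofList frames).filter
      (fun x => !PySem.Set.contains (PySem.Set.ofList frames) (x + 1))) (fun x => x) false)
  rw [h1, h2]
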